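-- pv_equiv track=rewrite | github.com/davidgardenier/chromos | misc/plot_pc_HETE_pulsations.py | findbestres
-- ===== SOURCE A (Python) =====
-- def findbestres(res):
--     '''Find the smallest resolution from a list of resolutions'''
--
--     # Split resolutions into values and units
--     heads = []
--     tails = []
--     for s in res:
--         unit = s.strip('0123456789')
--         num = s[:-len(unit)]
--         heads.append(num)
--         tails.append(unit)
--
--     # Sort by unit, then by value
--     unitorder = ['ms','us','s']
--     for u in unitorder:
--         if u in tails:
--             indices = [i for i, x in enumerate(tails) if x==u]
--             sameunits = [heads[i] for i in indices]
--             sortvalues = sorted(sameunits)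
--             return sortvalues[0]+u
-- ===== SOURCE B (Python) =====
-- def findbestres(res):
--     '''Find the smallest resolution from a list of resolutions'''
--     # Single pass: keep the best candidate seen so far, ranked by unit then value
--     rank = {'ms': 0, 'us': 1, 's': 2}
--     best = None  # ((rank, head), unit) of the best candidate so far
--     for s in res:
--         unit = s.strip('0123456789')
--         if unit in rank:
--             key = (rank[unit], s[:-len(unit)])
--             if best is None or key < best[0]:
--                 best = (key, unit)
--     if best is not None:
--         return best[0][1] + best[1]
-- ===== Notes on version B (the rewrite author's own statement) =====
-- stated objective: alternative
-- what changed: Replaces A's two-phase scheme (build parallel heads/tails lists, then for each unit in order filter indices and sort that group) with a single pass keeping a running minimum candidate under the composite key (unit rank, value string).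
-- outside the precondition, e.g. on findbestres(['5x']): A returns None, B returns None
import Mathlib
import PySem

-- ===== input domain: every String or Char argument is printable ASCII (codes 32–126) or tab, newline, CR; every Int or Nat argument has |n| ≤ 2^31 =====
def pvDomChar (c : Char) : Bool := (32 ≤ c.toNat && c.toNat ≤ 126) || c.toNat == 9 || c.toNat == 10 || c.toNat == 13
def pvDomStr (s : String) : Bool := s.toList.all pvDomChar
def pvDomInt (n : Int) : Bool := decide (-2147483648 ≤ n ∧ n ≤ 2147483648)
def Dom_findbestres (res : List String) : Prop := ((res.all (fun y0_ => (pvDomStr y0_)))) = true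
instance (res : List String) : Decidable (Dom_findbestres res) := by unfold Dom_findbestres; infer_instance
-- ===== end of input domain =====

-- B replaces A's two-phase grouping (parallel heads/tails lists, per-unit index filtering
-- and sorting) by a single pass keeping a running minimum under the composite key
-- (unit rank, value string) (objective: alternative).


-- shared parsing expressions (both Pythons compute these identically):
-- unit = s.strip('0123456789')
def pvUnit (s : String) : String := PySem.Str.stripChars s "0123456789"
-- num = s[:-len(unit)]
def pvHead (s : String) : String := PySem.Str.slice s none (some (-((PySem.Str.len (pvUnit s) : Int))))

-- ===== PORT A =====
-- the 'for u in unitorder: …' loop (falls off the end = Python's None, excluded by Pre_)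
def pvPickA (heads tails : List String) : List String → String
  | [] => ""  -- Python returns None here; excluded by Pre_findbestres
  | u :: rest =>
    if tails.contains u then
      let indices := ((PySem.List.enumerate tails 0).filter (fun p => p.2 == u)).map (fun p => p.1)
      let sameunits := indices.map (fun i => PySem.List.pyGetD heads i "")
      let sortvalues := PySem.List.sorted sameunits (fun x => x) false
      PySem.List.pyGetD sortvalues 0 "" ++ u
    else pvPickA heads tails rest

def findbestres (res : List String) : String :=
  let ht := res.foldl (fun (acc : List String × List String) s =>
    (acc.1 ++ [pvHead s], acc.2 ++ [pvUnit s])) ([], [])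
  pvPickA ht.1 ht.2 ["ms", "us", "s"]

-- ===== PORT B =====
-- rank = {'ms': 0, 'us': 1, 's': 2}
def pvRank : PySem.Dict String Int := PySem.Dict.mk [("ms", 0), ("us", 1), ("s", 2)]

-- Python's tuple comparison key < best[0] on (int, str)
def pvLt (a b : Int × String) : Bool := a.1 < b.1 || (a.1 == b.1 && a.2 < b.2)

-- one iteration of B's loop: state = the best ((rank, head), unit) so far (None at start)
def pvStepB (best : Option ((Int × String) × String)) (s : String) :
    Option ((Int × String) × String) :=
  match pvRank.get? (pvUnit s) with
  | some r =>
    let key := (r, pvHead s)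
    match best with
    | none => some (key, pvUnit s)
    | some b => if pvLt key b.1 then some (key, pvUnit s) else some b
  | none => best

def findbestres_alt (res : List String) : String :=
  match res.foldl pvStepB none with
  | some b => b.1.2 ++ b.2
  | none => ""  -- Python returns None here; excluded by Pre_findbestres

-- ===== PRECONDITION & SPEC =====
-- Pre_ excludes inputs where no resolution has unit 'ms', 'us' or 's': there Python A
-- falls off the function and returns None, which is not a String.
def Pre_findbestres (res : List String) : Prop :=
  ∃ s ∈ res, pvUnit s ∈ (["ms", "us", "s"] : List String)
instance (res : List String) : Decidable (Pre_findbestres res) := by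
  unfold Pre_findbestres; infer_instance
def pvWitness_findbestres : List String := ["10ms", "2us", "1s"]

def Spec_findbestres (res : List String) (out : String) : Prop := out = findbestres_alt res
instance (res : List String) (out : String) : Decidable (Spec_findbestres res out) := by unfold Spec_findbestres; infer_instance

-- ===== CLAIM (what is proved, stated in full; the proofs are below) =====
def Claim_equal_findbestres : Prop := ∀ (res : List String), Dom_findbestres res → Pre_findbestres res → Spec_findbestres res (findbestres res)

-- ===== LEMMAS AND PROOFS =====

-- the rank dict, characterised
theorem pvRank_get? (x : String) (r : Int) :
    pvRank.get? x = some r ↔ ((x = "ms" ∧ r = 0) ∨ (x = "us" ∧ r = 1) ∨ (x = "s" ∧ r = 2)) := by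
  simp only [pvRank, PySem.Dict.get?_mk_cons, beq_iff_eq]
  split_ifs with h1 h2 h3
  · subst h1; simp [eq_comm]
  · subst h2; simp [eq_comm]
  · subst h3; simp [eq_comm]
  · have : (PySem.Dict.mk ([] : List (String × Int))).get? x = none := by simp [PySem.Dict.get?]
    rw [this]; simp [Ne.symm h1, Ne.symm h2, Ne.symm h3]

-- lexicographic ≤ on (Int, String), and pvLt's relation to it
def pvLexLe (a b : Int × String) : Prop := a.1 < b.1 ∨ (a.1 = b.1 ∧ a.2 ≤ b.2)

theorem pvLt_iff (a b : Int × String) :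
    pvLt a b = true ↔ a.1 < b.1 ∨ (a.1 = b.1 ∧ a.2 < b.2) := by
  simp [pvLt]

theorem pvLt_false_iff (a b : Int × String) : pvLt a b = false ↔ pvLexLe b a := by
  rw [← Bool.not_eq_true, pvLt_iff, pvLexLe]
  constructor
  · intro h
    rw [not_or, not_and_or] at h
    obtain ⟨h1, h2⟩ := h
    rcases lt_trichotomy a.1 b.1 with hc | hc | hc
    · exact absurd hc h1
    · rcases h2 with h2 | h2
      · exact absurd hc h2
      · exact Or.inr ⟨hc.symm, le_of_not_gt h2⟩
    · exact Or.inl hc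
  · rintro (h | ⟨h1, h2⟩) <;> rw [not_or, not_and_or]
    · exact ⟨fun h' => absurd h (not_lt_of_gt h'), Or.inl (fun e => absurd h (not_lt_of_ge (le_of_eq e)))⟩
    · exact ⟨fun h' => absurd h' (not_lt_of_ge (le_of_eq h1)), Or.inr (not_lt_of_ge h2)⟩

theorem pvLexLe_refl (a : Int × String) : pvLexLe a a := Or.inr ⟨rfl, le_refl _⟩

theorem pvLexLe_trans {a b c : Int × String} (h1 : pvLexLe a b) (h2 : pvLexLe b c) :
    pvLexLe a c := by
  rcases h1 with h1 | ⟨h1, h1'⟩ <;> rcases h2 with h2 | ⟨h2, h2'⟩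
  · exact Or.inl (lt_trans h1 h2)
  · exact Or.inl (h2 ▸ h1)
  · exact Or.inl (h1 ▸ h2)
  · exact Or.inr ⟨h1.trans h2, le_trans h1' h2'⟩

theorem pvLt_lexLe {a b : Int × String} (h : pvLt a b = true) : pvLexLe a b := by
  rcases (pvLt_iff a b).1 h with h | ⟨h1, h2⟩
  · exact Or.inl h
  · exact Or.inr ⟨h1, le_of_lt h2⟩

-- the candidate a string contributes (None if its unit is not ranked)
def pvCand (s : String) : Option ((Int × String) × String) :=
  (pvRank.get? (pvUnit s)).map (fun r => ((r, pvHead s), pvUnit s))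

-- the min-combining step on the candidate stream
def pvMin (b : Option ((Int × String) × String)) (c : (Int × String) × String) :
    Option ((Int × String) × String) :=
  match b with
  | none => some c
  | some b' => if pvLt c.1 b'.1 then some c else some b'

-- B's loop is the min-fold of the candidate stream
theorem pv_fold_eq (res : List String) (acc : Option ((Int × String) × String)) :
    res.foldl pvStepB acc = (res.filterMap pvCand).foldl pvMin acc := by
  induction res generalizing acc with
  | nil => rfl
  | cons s t ih =>
    simp only [List.foldl_cons, List.filterMap_cons]
    rcases h : pvRank.get? (pvUnit s) with _ | r
    · have : pvStepB acc s = acc := by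
        unfold pvStepB; rw [h]
      rw [this, pvCand, h]; exact ih acc
    · have hc : pvCand s = some ((r, pvHead s), pvUnit s) := by rw [pvCand, h]; rfl
      rw [hc]
      have : pvStepB acc s = pvMin acc ((r, pvHead s), pvUnit s) := by
        unfold pvStepB pvMin; rw [h]
      rw [this]
      simp only [List.foldl_cons]
      exact ih _

-- the min-fold from a seed returns a minimal element
theorem pv_minFold_some (l : List ((Int × String) × String)) (a : (Int × String) × String) :
    ∃ m, l.foldl pvMin (some a) = some m ∧ (m = a ∨ m ∈ l) ∧ pvLexLe m.1 a.1 ∧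
      ∀ c ∈ l, pvLexLe m.1 c.1 := by
  induction l generalizing a with
  | nil => exact ⟨a, rfl, Or.inl rfl, pvLexLe_refl _, by simp⟩
  | cons c t ih =>
    simp only [List.foldl_cons, pvMin]
    by_cases hlt : pvLt c.1 a.1 = true
    · rw [if_pos hlt]
      obtain ⟨m, h1, h2, h3, h4⟩ := ih c
      refine ⟨m, h1, ?_, pvLexLe_trans h3 (pvLt_lexLe hlt), fun x hx => ?_⟩
      · rcases h2 with h2 | h2
        · exact Or.inr (h2 ▸ List.mem_cons_self)
        · exact Or.inr (List.mem_cons_of_mem _ h2)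
      · rcases List.mem_cons.1 hx with rfl | hx
        · exact h3
        · exact h4 x hx
    · rw [if_neg hlt]
      obtain ⟨m, h1, h2, h3, h4⟩ := ih a
      refine ⟨m, h1, ?_, h3, fun x hx => ?_⟩
      · rcases h2 with h2 | h2
        · exact Or.inl h2
        · exact Or.inr (List.mem_cons_of_mem _ h2)
      · rcases List.mem_cons.1 hx with rfl | hx
        · exact pvLexLe_trans h3 ((pvLt_false_iff _ _).1 (Bool.eq_false_iff.2 hlt))
        · exact h4 x hx

theorem pv_minFold_nonempty (l : List ((Int × String) × String)) (hl : l ≠ []) :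
    ∃ m, l.foldl pvMin none = some m ∧ m ∈ l ∧ ∀ c ∈ l, pvLexLe m.1 c.1 := by
  rcases l with _ | ⟨c, t⟩
  · exact absurd rfl hl
  · simp only [List.foldl_cons, pvMin]
    obtain ⟨m, h1, h2, h3, h4⟩ := pv_minFold_some t c
    refine ⟨m, h1, ?_, fun x hx => ?_⟩
    · rcases h2 with h2 | h2
      · exact h2 ▸ List.mem_cons_self
      · exact List.mem_cons_of_mem _ h2
    · rcases List.mem_cons.1 hx with rfl | hx
      · exact h3
      · exact h4 x hx

-- A's heads/tails building loop is two maps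
theorem pv_ht (res : List String) :
    res.foldl (fun (acc : List String × List String) s =>
      (acc.1 ++ [pvHead s], acc.2 ++ [pvUnit s])) ([], []) =
    (res.map pvHead, res.map pvUnit) := by
  rw [PySem.List.foldl_prod_mk (fun a s => a ++ [pvHead s]) (fun a s => a ++ [pvUnit s])]
  rw [PySem.List.foldl_append_singleton_eq_map, PySem.List.foldl_append_singleton_eq_map]
  simp

-- A's enumerate/filter/index chain is a filter of the source list
theorem pv_enumFilt (u : String) (pre hs ts : List String) (hlen : hs.length = ts.length) :
    (((PySem.List.enumerate ts (pre.length : Int)).filter (fun p => p.2 == u)).map (fun p => p.1)).map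
      (fun i => PySem.List.pyGetD (pre ++ hs) i "") =
    ((hs.zip ts).filter (fun p => p.2 == u)).map (fun p => p.1) := by
  induction ts generalizing hs pre with
  | nil => cases hs <;> simp [PySem.List.enumerate] at hlen ⊢
  | cons t ts ih =>
    cases hs with
    | nil => simp at hlen
    | cons h hs =>
      simp only [List.length_cons] at hlen
      rw [PySem.List.enumerate_cons]
      have hrec := ih (pre ++ [h]) hs (by omega)
      have hlen' : ((pre ++ [h]).length : Int) = (pre.length : Int) + 1 := by
        simp
      rw [hlen', List.append_assoc] at hrec
      simp only [List.singleton_append] at hrec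
      by_cases hu : t = u
      · subst hu
        rw [List.zip_cons_cons, List.filter_cons_of_pos (by simp),
          List.filter_cons_of_pos (by simp), List.map_cons, List.map_cons, hrec]
        congr 1
        rw [PySem.List.pyGetD_natCast]
        simp [List.getD_eq_getElem?_getD]
      · rw [List.zip_cons_cons, List.filter_cons_of_neg (by simp [hu]),
          List.filter_cons_of_neg (by simp [hu])]
        exact hrec

-- sorted(g)[0] = min(g) for nonempty g (their values coincide: both are ≤-least members)
theorem pv_min_head (g : List String) (hg : g ≠ []) :
    PySem.List.pyGetD (PySem.List.sorted g (fun x => x) false) 0 "" =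
    (PySem.List.min? g (fun x => x)).getD "" := by
  obtain ⟨m, t, hs⟩ : ∃ m t, PySem.List.sorted g (fun x => x) false = m :: t := by
    rcases h : PySem.List.sorted g (fun x => x) false with _ | ⟨m, t⟩
    · exact absurd ((PySem.List.sorted_eq_nil_iff g _ false).1 h) hg
    · exact ⟨m, t, rfl⟩
  obtain ⟨m', hm'⟩ : ∃ m', PySem.List.min? g (fun x => x) = some m' := by
    rcases h : PySem.List.min? g (fun x => x) with _ | m'
    · exact absurd ((PySem.List.min?_eq_none_iff g _).1 h) hg
    · exact ⟨m', rfl⟩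
  rw [hs, hm', PySem.List.pyGetD_zero_cons, Option.getD_some]
  have hmem : m ∈ g := (PySem.List.mem_sorted g _ false m).1 (hs ▸ List.mem_cons_self)
  exact le_antisymm (PySem.List.key_head_sorted_le g _ hs m' (PySem.List.min?_mem hm'))
    (PySem.List.min?_isMin hm' m hmem)

-- A's body for a present unit u, written as min? of the heads whose unit is u
theorem pvA_case (res : List String) (u : String) (hc : u ∈ res.map pvUnit) :
    PySem.List.pyGetD (PySem.List.sorted
        ((((PySem.List.enumerate (res.map pvUnit) 0).filter (fun p => p.2 == u)).map (fun p => p.1)).map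
          (fun i => PySem.List.pyGetD (res.map pvHead) i "")) (fun x => x) false) 0 "" ++ u =
    (PySem.List.min? ((res.filter (fun s => pvUnit s == u)).map pvHead) (fun x => x)).getD "" ++ u := by
  have hsame :
      ((((PySem.List.enumerate (res.map pvUnit) 0).filter (fun p => p.2 == u)).map (fun p => p.1)).map
        (fun i => PySem.List.pyGetD (res.map pvHead) i "")) =
      (res.filter (fun s => pvUnit s == u)).map pvHead := by
    have := pv_enumFilt u [] (res.map pvHead) (res.map pvUnit) (by simp)
    simp only [List.nil_append, List.length_nil, Nat.cast_zero] at this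
    rw [this, List.zip_map']
    simp [List.filter_map, Function.comp_def]
  have hne : (res.filter (fun s => pvUnit s == u)).map pvHead ≠ [] := by
    obtain ⟨s, hs, hu⟩ := List.mem_map.1 hc
    simp only [ne_eq, List.map_eq_nil_iff, List.filter_eq_nil_iff]
    intro h'
    exact h' s hs (by simp [hu])
  rw [hsame, pv_min_head _ hne]

-- B's value when u is the preferred unit present: min? of the heads whose unit is u
theorem pv_bridge (res : List String) (u : String) (r : Int)
    (hru : pvRank.get? u = some r)
    (hmem : u ∈ res.map pvUnit)
    (hmin : ∀ s ∈ res, ∀ r', pvRank.get? (pvUnit s) = some r' → r ≤ r') :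
    findbestres_alt res =
      (PySem.List.min? ((res.filter (fun s => pvUnit s == u)).map pvHead) (fun x => x)).getD "" ++ u := by
  obtain ⟨s0, hs0, hu0⟩ := List.mem_map.1 hmem
  have hcand0 : pvCand s0 = some ((r, pvHead s0), u) := by
    rw [pvCand, hu0, hru]; rfl
  have hne : res.filterMap pvCand ≠ [] := by
    intro h
    have : pvCand s0 = none := by
      have := List.filterMap_eq_nil_iff.1 h s0 hs0
      exact this
    rw [hcand0] at this; cases this
  obtain ⟨m, hm, hmemm, hminm⟩ := pv_minFold_nonempty _ hne
  -- m comes from some s1 ∈ res with a ranked unit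
  obtain ⟨s1, hs1, hc1⟩ := List.mem_filterMap.1 hmemm
  obtain ⟨r1, hr1, hm1⟩ : ∃ r1, pvRank.get? (pvUnit s1) = some r1 ∧
      m = ((r1, pvHead s1), pvUnit s1) := by
    rcases h : pvRank.get? (pvUnit s1) with _ | r1
    · rw [pvCand, h] at hc1; cases hc1
    · rw [pvCand, h] at hc1; exact ⟨r1, rfl, (Option.some_inj.1 hc1).symm⟩
  -- m's rank is exactly r
  have hr_le : r ≤ r1 := hmin s1 hs1 r1 hr1
  have hle0 : pvLexLe m.1 (r, pvHead s0) := by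
    have := hminm ((r, pvHead s0), u) (List.mem_filterMap.2 ⟨s0, hs0, hcand0⟩)
    exact this
  have hr1_le : r1 ≤ r := by
    rcases hle0 with h | ⟨h, _⟩
    · rw [hm1] at h; exact le_of_lt h
    · rw [hm1] at h; exact le_of_eq h
  have hr_eq : r1 = r := le_antisymm hr1_le hr_le
  -- rank determines the unit: pvUnit s1 = u
  have hu1 : pvUnit s1 = u := by
    have h1 := (pvRank_get? _ _).1 hr1
    have h2 := (pvRank_get? _ _).1 hru
    rcases h1 with ⟨e1, e2⟩ | ⟨e1, e2⟩ | ⟨e1, e2⟩ <;>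
      rcases h2 with ⟨f1, f2⟩ | ⟨f1, f2⟩ | ⟨f1, f2⟩ <;>
        first
          | (exfalso; omega)
          | (rw [e1, f1])
  -- m's head is the min? of the heads with unit u
  have hmem_head : pvHead s1 ∈ (res.filter (fun s => pvUnit s == u)).map pvHead :=
    List.mem_map.2 ⟨s1, List.mem_filter.2 ⟨hs1, by simp [hu1]⟩, rfl⟩
  obtain ⟨mn, hmn⟩ : ∃ mn, PySem.List.min? ((res.filter (fun s => pvUnit s == u)).map pvHead)
      (fun x => x) = some mn := by
    rcases h : PySem.List.min? ((res.filter (fun s => pvUnit s == u)).map pvHead) (fun x => x)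
      with _ | mn
    · rw [PySem.List.min?_eq_none_iff] at h
      rw [h] at hmem_head; cases hmem_head
    · exact ⟨mn, rfl⟩
  have hmn_mem := PySem.List.min?_mem hmn
  obtain ⟨s2, hs2, hh2⟩ := List.mem_map.1 hmn_mem
  have hs2' := List.mem_filter.1 hs2
  have hu2 : pvUnit s2 = u := by simpa using hs2'.2
  have hcand2 : pvCand s2 = some ((r, pvHead s2), u) := by
    rw [pvCand, hu2, hru]; rfl
  have hle2 : pvLexLe m.1 (r, pvHead s2) :=
    hminm ((r, pvHead s2), u) (List.mem_filterMap.2 ⟨s2, hs2'.1, hcand2⟩)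
  have h_head_le : pvHead s1 ≤ mn := by
    rcases hle2 with h | ⟨_, h⟩
    · rw [hm1, hr_eq] at h; exact absurd h (lt_irrefl _)
    · rw [hm1] at h; rw [← hh2]; exact h
  have h_le_head : mn ≤ pvHead s1 := PySem.List.min?_isMin hmn _ hmem_head
  have hhead : pvHead s1 = mn := le_antisymm h_head_le h_le_head
  unfold findbestres_alt
  rw [pv_fold_eq, hm, hm1, hmn]
  simp [hhead, hu1]

-- ===== VERDICT (by name: the statement is the Claim_ definition above) =====
theorem findbestres_spec : Claim_equal_findbestres := by
  intro res _ hpre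
  unfold Spec_findbestres findbestres
  rw [pv_ht]
  simp only
  by_cases hms : "ms" ∈ res.map pvUnit
  · rw [pvPickA, if_pos (by simpa using hms), pvA_case res "ms" hms,
      pv_bridge res "ms" 0 (by rw [pvRank_get?]; tauto) hms ?_]
    intro s hs r' hr'
    rcases (pvRank_get? _ _).1 hr' with ⟨_, e⟩ | ⟨_, e⟩ | ⟨_, e⟩ <;> omega
  · by_cases hus : "us" ∈ res.map pvUnit
    · rw [pvPickA, if_neg (by simpa using hms), pvPickA, if_pos (by simpa using hus),
        pvA_case res "us" hus,
        pv_bridge res "us" 1 (by rw [pvRank_get?]; tauto) hus ?_]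
      intro s hs r' hr'
      rcases (pvRank_get? _ _).1 hr' with ⟨e, e'⟩ | ⟨e, e'⟩ | ⟨e, e'⟩
      · exact absurd (List.mem_map.2 ⟨s, hs, e⟩) hms
      · omega
      · omega
    · by_cases hss : "s" ∈ res.map pvUnit
      · rw [pvPickA, if_neg (by simpa using hms), pvPickA, if_neg (by simpa using hus),
          pvPickA, if_pos (by simpa using hss), pvA_case res "s" hss,
          pv_bridge res "s" 2 (by rw [pvRank_get?]; tauto) hss ?_]
        intro s hs r' hr'
        rcases (pvRank_get? _ _).1 hr' with ⟨e, e'⟩ | ⟨e, e'⟩ | ⟨e, e'⟩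
        · exact absurd (List.mem_map.2 ⟨s, hs, e⟩) hms
        · exact absurd (List.mem_map.2 ⟨s, hs, e⟩) hus
        · omega
      · exfalso
        obtain ⟨s, hs, hu⟩ := hpre
        rcases (by simpa using hu : pvUnit s = "ms" ∨ pvUnit s = "us" ∨ pvUnit s = "s") with h | h | h
        · exact hms (List.mem_map.2 ⟨s, hs, h⟩)
        · exact hus (List.mem_map.2 ⟨s, hs, h⟩)
        · exact hss (List.mem_map.2 ⟨s, hs, h⟩)
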